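-- pv_equiv track=rewrite | github.com/HajarAkaouch/PROJET_AER8500 | arinc429.py | octal_to_binary_list
-- ===== SOURCE A (Python) =====
-- def octal_to_binary_list(octal_num):
--     binary_list = []
--     binary_str = format(octal_num, 'o')
--     for digit in binary_str:
--         binary_digit = bin(int(digit))[2:].zfill(3)
--         binary_list.extend(list(map(int, binary_digit)))
--     binary_list = [0] * (8 - len(binary_list)) + binary_list
--
--     return binary_list
-- ===== SOURCE B (Python) =====
-- def octal_to_binary_list(octal_num):
--     width = max(3 * len(format(octal_num, 'o')), 8)
--     return [int(c) for c in format(octal_num, '0{}b'.format(width))]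
-- ===== Notes on version B (the rewrite author's own statement) =====
-- stated objective: simpler
-- what changed: B replaces the per-octal-digit inner loop (expand each octal digit to 3 bits, then pad to 8) by one width computation max(3*len(oct(n)),8) and a single binary formatting pass of the whole number.
import Mathlib
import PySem

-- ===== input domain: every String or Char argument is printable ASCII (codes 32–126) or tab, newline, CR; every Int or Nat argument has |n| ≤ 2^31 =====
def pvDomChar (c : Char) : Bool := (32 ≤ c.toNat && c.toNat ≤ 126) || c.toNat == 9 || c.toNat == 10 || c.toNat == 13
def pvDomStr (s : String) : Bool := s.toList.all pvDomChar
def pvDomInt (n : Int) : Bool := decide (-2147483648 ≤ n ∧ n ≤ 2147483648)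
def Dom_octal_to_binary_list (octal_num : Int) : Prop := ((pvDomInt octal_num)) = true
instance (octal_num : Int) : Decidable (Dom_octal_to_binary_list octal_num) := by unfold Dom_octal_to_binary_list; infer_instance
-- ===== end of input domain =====

-- B computes the padded width max(3*octal-digit-count, 8) up front and formats the whole
-- number to binary once, instead of expanding each octal digit to 3 bits and padding afterward.

-- ===== PORT A =====
-- format(n,'o'): octal digits of n, most significant first (exact for n ≥ 0; negatives raise in A and are outside Pre_)
def octDigitsA (n : Nat) : List Nat :=
  if n < 8 then [n] else octDigitsA (n / 8) ++ [n % 8]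
decreasing_by exact Nat.div_lt_self (by omega) (by omega)

-- bin(int(digit))[2:].zfill(3): the 3-bit expansion of one octal digit (exact for digit values 0–7)
def bits3 (d : Nat) : List Int := [((d / 4) % 2 : Nat), ((d / 2) % 2 : Nat), (d % 2 : Nat)]

def octal_to_binary_list (octal_num : Int) : List Int :=
  let binary_list := ((octDigitsA octal_num.toNat).map bits3).flatten
  List.replicate (8 - binary_list.length) 0 ++ binary_list

-- ===== PORT B =====
-- len(format(n,'o')): number of octal digits of n
def octLen (n : Nat) : Nat :=
  if n < 8 then 1 else octLen (n / 8) + 1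
decreasing_by exact Nat.div_lt_self (by omega) (by omega)

-- format(n,'0{w}b') turned into its digit list: the w low binary digits of n, most significant first (exact for n < 2^w)
def binAt (w n : Nat) : List Int :=
  match w with
  | 0 => []
  | w + 1 => binAt w (n / 2) ++ [((n % 2 : Nat) : Int)]

def octal_to_binary_list_alt (octal_num : Int) : List Int :=
  let width := max (3 * octLen octal_num.toNat) 8
  binAt width octal_num.toNat

-- ===== PRECONDITION & SPEC =====
-- Pre_ excludes negative inputs: there format(octal_num,'o') starts with '-' and int('-') raises ValueError in A.
def Pre_octal_to_binary_list (octal_num : Int) : Prop := 0 ≤ octal_num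
instance (octal_num : Int) : Decidable (Pre_octal_to_binary_list octal_num) := by unfold Pre_octal_to_binary_list; infer_instance
def pvWitness_octal_to_binary_list : Int := 5

def Spec_octal_to_binary_list (octal_num : Int) (out : List Int) : Prop := out = octal_to_binary_list_alt octal_num
instance (octal_num : Int) (out : List Int) : Decidable (Spec_octal_to_binary_list octal_num out) := by unfold Spec_octal_to_binary_list; infer_instance

-- ===== CLAIM (what is proved, stated in full; the proofs are below) =====
def Claim_equal_octal_to_binary_list : Prop := ∀ (octal_num : Int), Dom_octal_to_binary_list octal_num → Pre_octal_to_binary_list octal_num → Spec_octal_to_binary_list octal_num (octal_to_binary_list octal_num)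

-- ===== LEMMAS AND PROOFS =====

theorem binAt_length (w n : Nat) : (binAt w n).length = w := by
  induction w generalizing n with
  | zero => rfl
  | succ w ih => simp [binAt, ih]

theorem binAt_append (b a m r : Nat) (h : r < 2 ^ b) :
    binAt a m ++ binAt b r = binAt (a + b) (m * 2 ^ b + r) := by
  induction b generalizing r with
  | zero =>
    interval_cases r
    simp [binAt]
  | succ b ih =>
    have e : (2:Nat) ^ (b + 1) = 2 ^ b * 2 := pow_succ _ _
    have h2 : r / 2 < 2 ^ b := Nat.div_lt_of_lt_mul (by rw [e] at h; omega)
    have hdiv : (m * (2 ^ b * 2) + r) / 2 = m * 2 ^ b + r / 2 := by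
      rw [show m * (2 ^ b * 2) = m * 2 ^ b * 2 by ring]; omega
    have hmod : (m * (2 ^ b * 2) + r) % 2 = r % 2 := by
      rw [show m * (2 ^ b * 2) = m * 2 ^ b * 2 by ring]; omega
    show binAt a m ++ (binAt b (r / 2) ++ _) = binAt (a + b) _ ++ _
    rw [e, hdiv, hmod, ← ih (r / 2) h2, List.append_assoc]

theorem bits3_eq (d : Nat) : bits3 d = binAt 3 d := by
  simp [bits3, binAt, Nat.div_div_eq_div_mul]

theorem octLen_eq (n : Nat) : octLen n = (octDigitsA n).length := by
  fun_induction octLen n with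
  | case1 n h => rw [octDigitsA, if_pos h]; rfl
  | case2 n h ih => rw [octDigitsA, if_neg h]; simp [ih]

theorem octDigitsA_lt (n : Nat) : n < 8 ^ (octDigitsA n).length := by
  fun_induction octDigitsA n with
  | case1 n h => simpa using h
  | case2 n h ih =>
    simp only [List.length_append, List.length_cons, List.length_nil, pow_succ]
    have := Nat.div_add_mod n 8
    nlinarith [Nat.mod_lt n (show 0 < 8 by omega)]

theorem flatten_eq (n : Nat) :
    ((octDigitsA n).map bits3).flatten = binAt (3 * (octDigitsA n).length) n := by
  fun_induction octDigitsA n with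
  | case1 n h =>
    simp [bits3_eq]
  | case2 n h ih =>
    have hmod : n % 8 < 2 ^ 3 := by omega
    have : n / 8 * 2 ^ 3 + n % 8 = n := by omega
    simp only [List.map_append, List.flatten_append, List.map_cons, List.map_nil,
      List.flatten_cons, List.flatten_nil, List.append_nil, ih, bits3_eq,
      List.length_append, List.length_cons, List.length_nil]
    rw [binAt_append 3 _ _ _ hmod, this]
    ring_nf

theorem replicate_eq_binAt (p : Nat) : List.replicate p (0 : Int) = binAt p 0 := by
  induction p with
  | zero => rfl
  | succ p ih => rw [List.replicate_succ', binAt, ih]; norm_num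

-- ===== VERDICT (by name: the statement is the Claim_ definition above) =====
theorem octal_to_binary_list_spec : Claim_equal_octal_to_binary_list := by
  intro octal_num _ _
  show _ = octal_to_binary_list_alt octal_num
  unfold octal_to_binary_list octal_to_binary_list_alt
  set n := octal_num.toNat with hn
  simp only [flatten_eq, binAt_length, octLen_eq]
  set d := (octDigitsA n).length with hd
  by_cases h8 : 3 * d ≤ 8
  · have hmax : max (3 * d) 8 = 8 := by omega
    have hlt : n < 2 ^ (3 * d) := by
      have := octDigitsA_lt n
      calc n < 8 ^ d := this
        _ = 2 ^ (3 * d) := by rw [show (8:Nat) = 2 ^ 3 by rfl, ← pow_mul, Nat.mul_comm]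
    rw [hmax, replicate_eq_binAt, binAt_append _ _ _ _ hlt]
    congr 1 <;> omega
  · have hmax : max (3 * d) 8 = 3 * d := by omega
    have : 8 - 3 * d = 0 := by omega
    rw [hmax, this]
    simp
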